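-- pv_equiv track=rewrite | github.com/swoop-there-it-is/advent_of_code_2024 | day_one/historian_hysteria.py | _get_similarities_between_lists
-- ===== SOURCE A (Python) =====
-- from typing import List
--
-- def _get_similarities_between_lists(location_ids_one: List[int], location_ids_two: List[int]) -> int:
--     list_two_totals: dict[int: int] = {}
--     for location_id in location_ids_two:
--         if list_two_totals.get(location_id):
--             list_two_totals[location_id] += 1
--             continue
--         list_two_totals[location_id] = 1
--
--     results = 0
--     for location_id in location_ids_one:
--         total = list_two_totals.get(location_id, 0)
--         results += (location_id * total)
--
--     return results
-- ===== SOURCE B (Python) =====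
-- from typing import List
--
-- def _get_similarities_between_lists(location_ids_one: List[int], location_ids_two: List[int]) -> int:
--     a = sorted(location_ids_one)
--     b = sorted(location_ids_two)
--     total = 0
--     i = j = 0
--     while i < len(a) and j < len(b):
--         if a[i] < b[j]:
--             i += 1
--         elif b[j] < a[i]:
--             j += 1
--         else:
--             v = a[i]
--             i2 = i
--             while i2 < len(a) and a[i2] == v:
--                 i2 += 1
--             j2 = j
--             while j2 < len(b) and b[j2] == v:
--                 j2 += 1
--             total += v * (i2 - i) * (j2 - j)
--             i, j = i2, j2
--     return total
-- ===== Notes on version B (the rewrite author's own statement) =====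
-- stated objective: alternative
-- what changed: Replaces A's frequency-dict build plus lookup pass with sorting both lists and a two-pointer merge over runs of equal values, adding v * run1 * run2 per common value.
import Mathlib
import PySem

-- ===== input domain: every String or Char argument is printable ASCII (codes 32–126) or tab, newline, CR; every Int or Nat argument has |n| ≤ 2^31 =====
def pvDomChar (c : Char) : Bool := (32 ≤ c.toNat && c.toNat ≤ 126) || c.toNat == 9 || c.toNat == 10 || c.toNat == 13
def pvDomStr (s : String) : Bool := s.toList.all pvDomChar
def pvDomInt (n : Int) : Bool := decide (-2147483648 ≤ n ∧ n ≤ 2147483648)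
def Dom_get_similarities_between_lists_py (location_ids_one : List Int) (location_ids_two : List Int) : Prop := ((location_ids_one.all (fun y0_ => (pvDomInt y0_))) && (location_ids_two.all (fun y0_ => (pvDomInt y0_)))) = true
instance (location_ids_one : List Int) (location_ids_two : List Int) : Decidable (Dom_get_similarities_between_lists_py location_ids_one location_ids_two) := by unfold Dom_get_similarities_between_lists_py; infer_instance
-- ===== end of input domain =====

-- B replaces A's frequency-dict-then-lookup strategy with sorting both lists and a
-- two-pointer merge over runs of equal values (alternative algorithm, no speed claim).

-- ===== PORT A =====
-- A: build a count dict over list two ('if d.get(id): d[id] += 1 else d[id] = 1'),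
-- then one pass over list one accumulating id * d.get(id, 0).
def get_similarities_between_lists_py (location_ids_one : List Int) (location_ids_two : List Int) : Int :=
  let list_two_totals : PySem.Dict Int Int :=
    location_ids_two.foldl
      (fun d location_id =>
        if (d.get? location_id).getD 0 ≠ 0 then          -- 'if list_two_totals.get(location_id):' (truthiness of the count)
          d.insert location_id ((d.get? location_id).getD 0 + 1)   -- 'list_two_totals[location_id] += 1' (key present here)
        else
          d.insert location_id 1)                        -- 'list_two_totals[location_id] = 1'
      PySem.Dict.empty
  location_ids_one.foldl
    (fun results location_id => results + location_id * list_two_totals.getD location_id 0) 0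

-- ===== PORT B =====
-- B (Source B): sort both lists, then a two-pointer merge; for each value present in both,
-- advance past its run in each list and add v * run1 * run2.

-- inner 'while i2 < len(a) and a[i2] == v: i2 += 1'
def pvRunEnd (a : List Int) (v : Int) (i : Nat) : Nat :=
  if h : i < a.length ∧ a.getD i 0 = v then pvRunEnd a v (i + 1) else i
termination_by a.length - i
decreasing_by omega

theorem pvRunEnd_ge (a : List Int) (v : Int) (i : Nat) : i ≤ pvRunEnd a v i := by
  induction i using pvRunEnd.induct (a := a) (v := v) with
  | case1 i h ih => rw [pvRunEnd, dif_pos h]; omega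
  | case2 i h => rw [pvRunEnd, dif_neg h]

theorem pvRunEnd_le (a : List Int) (v : Int) (i : Nat) (hi : i ≤ a.length) :
    pvRunEnd a v i ≤ a.length := by
  induction i using pvRunEnd.induct (a := a) (v := v) with
  | case1 i h ih => rw [pvRunEnd, dif_pos h]; exact ih h.1
  | case2 i h => rw [pvRunEnd, dif_neg h]; exact hi

theorem pvRunEnd_succ_le (a : List Int) (v : Int) (i : Nat)
    (h : i < a.length) (hv : a.getD i 0 = v) : i + 1 ≤ pvRunEnd a v i := by
  rw [pvRunEnd, dif_pos ⟨h, hv⟩]; exact pvRunEnd_ge a v (i + 1)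

-- outer 'while i < len(a) and j < len(b): …'
def pvMergeLoop (a b : List Int) (i j : Nat) (total : Int) : Int :=
  if h : i < a.length ∧ j < b.length then
    if a.getD i 0 < b.getD j 0 then
      pvMergeLoop a b (i + 1) j total
    else if b.getD j 0 < a.getD i 0 then
      pvMergeLoop a b i (j + 1) total
    else
      pvMergeLoop a b (pvRunEnd a (a.getD i 0) i) (pvRunEnd b (a.getD i 0) j)
        (total + a.getD i 0 * ((pvRunEnd a (a.getD i 0) i : Int) - (i : Int))
                            * ((pvRunEnd b (a.getD i 0) j : Int) - (j : Int)))
  else total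
termination_by a.length - i + (b.length - j)
decreasing_by
  · omega
  · omega
  · have h1 := pvRunEnd_succ_le a (a.getD i 0) i h.1 rfl
    have h2 := pvRunEnd_le a (a.getD i 0) i (Nat.le_of_lt h.1)
    have h3 := pvRunEnd_ge b (a.getD i 0) j
    have h4 := pvRunEnd_le b (a.getD i 0) j (Nat.le_of_lt h.2)
    omega

def get_similarities_between_lists_py_alt (location_ids_one : List Int) (location_ids_two : List Int) : Int :=
  pvMergeLoop (PySem.List.sorted location_ids_one (fun x => x) false)
              (PySem.List.sorted location_ids_two (fun x => x) false) 0 0 0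

-- ===== PRECONDITION & SPEC =====
def Spec_get_similarities_between_lists_py (location_ids_one : List Int) (location_ids_two : List Int) (out : Int) : Prop := out = get_similarities_between_lists_py_alt location_ids_one location_ids_two
instance (location_ids_one : List Int) (location_ids_two : List Int) (out : Int) : Decidable (Spec_get_similarities_between_lists_py location_ids_one location_ids_two out) := by unfold Spec_get_similarities_between_lists_py; infer_instance

-- ===== CLAIM (what is proved, stated in full; the proofs are below) =====
def Claim_equal_get_similarities_between_lists_py : Prop := ∀ (location_ids_one : List Int) (location_ids_two : List Int), Dom_get_similarities_between_lists_py location_ids_one location_ids_two → Spec_get_similarities_between_lists_py location_ids_one location_ids_two (get_similarities_between_lists_py location_ids_one location_ids_two)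

-- ===== LEMMAS AND PROOFS =====

-- the common value both programs compute: Σ_{x ∈ a} x * (number of occurrences of x in b)
def pvS (a b : List Int) : Int := (a.map (fun x => x * (b.count x : Int))).sum

theorem pvS_nil_right (a : List Int) : pvS a [] = 0 := by
  simp [pvS]

theorem pvS_congr_right (a b1 b2 : List Int)
    (h : ∀ x ∈ a, b1.count x = b2.count x) : pvS a b1 = pvS a b2 := by
  unfold pvS
  rw [List.map_congr_left (fun x hx => by rw [h x hx])]

-- structure of a run: drop i a = replicate (runEnd − i) v ++ drop runEnd a
theorem pvRunEnd_drop (a : List Int) (v : Int) (i : Nat) :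
    a.drop i = List.replicate (pvRunEnd a v i - i) v ++ a.drop (pvRunEnd a v i) := by
  induction i using pvRunEnd.induct (a := a) (v := v) with
  | case1 i h ih =>
    rw [pvRunEnd, dif_pos h]
    have hge := pvRunEnd_ge a v (i + 1)
    have hcons : a.drop i = a[i] :: a.drop (i + 1) := List.drop_eq_getElem_cons h.1
    have hvi : a[i] = v := by
      have := h.2; rwa [List.getD_eq_getElem a 0 h.1] at this
    have hk : pvRunEnd a v (i + 1) - i = (pvRunEnd a v (i + 1) - (i + 1)) + 1 := by omega
    rw [hcons, hvi, ih, hk, List.replicate_succ, List.cons_append]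
  | case2 i hc =>
    rw [pvRunEnd, dif_neg hc]; simp

theorem pvRunEnd_stop (a : List Int) (v : Int) (i : Nat)
    (h : pvRunEnd a v i < a.length) : a.getD (pvRunEnd a v i) 0 ≠ v := by
  induction i using pvRunEnd.induct (a := a) (v := v) with
  | case1 i hc ih =>
    rw [pvRunEnd, dif_pos hc] at h ⊢
    exact ih h
  | case2 i hc =>
    rw [pvRunEnd, dif_neg hc] at h ⊢
    intro hv
    exact hc ⟨h, hv⟩

-- sortedness: every element of drop i a is ≥ a.getD i 0
theorem pv_drop_head_le (a : List Int) (i : Nat)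
    (ha : a.Pairwise (· ≤ ·)) (h : i < a.length) :
    ∀ x ∈ a.drop i, a.getD i 0 ≤ x := by
  intro x hx
  have hcons : a.drop i = a[i] :: a.drop (i + 1) := List.drop_eq_getElem_cons h
  have hp : (a.drop i).Pairwise (· ≤ ·) := ha.drop
  rw [hcons] at hx hp
  rw [List.getD_eq_getElem a 0 h]
  rcases List.mem_cons.1 hx with rfl | hx'
  · exact le_refl _
  · exact (List.pairwise_cons.1 hp).1 x hx'

-- drop j2 is a suffix of drop j for j ≤ j2
theorem pv_mem_drop_of_mem_drop (b : List Int) (j j2 : Nat) (hjj : j ≤ j2)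
    (x : Int) (hx : x ∈ b.drop j2) : x ∈ b.drop j := by
  have : b.drop j2 = (b.drop j).drop (j2 - j) := by
    rw [List.drop_drop]; congr 1; omega
  rw [this] at hx
  exact List.mem_of_mem_drop hx

-- after a run of v (started at a position holding v), everything is > v
theorem pv_gt_after_run (a : List Int) (v : Int) (i : Nat)
    (ha : a.Pairwise (· ≤ ·)) (hi : i < a.length) (hv : a.getD i 0 = v) :
    ∀ x ∈ a.drop (pvRunEnd a v i), v < x := by
  intro x hx
  set i2 := pvRunEnd a v i with hi2
  have hlen : i2 ≤ a.length := pvRunEnd_le a v i (Nat.le_of_lt hi)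
  have hi2lt : i2 < a.length := by
    by_contra hge
    have : a.drop i2 = [] := List.drop_eq_nil_of_le (by omega)
    rw [this] at hx; exact (List.not_mem_nil).elim hx
  have hne : a.getD i2 0 ≠ v := pvRunEnd_stop a v i hi2lt
  have hheadle : a.getD i2 0 ≤ x := pv_drop_head_le a i2 ha hi2lt x hx
  have hvle : v ≤ a.getD i2 0 := by
    have hmem : a.getD i2 0 ∈ a.drop i := by
      apply pv_mem_drop_of_mem_drop a i i2 (pvRunEnd_ge a v i)
      rw [List.getD_eq_getElem a 0 hi2lt]
      have : a.drop i2 = a[i2] :: a.drop (i2 + 1) := List.drop_eq_getElem_cons hi2lt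
      rw [this]; exact List.mem_cons_self
    have := pv_drop_head_le a i ha hi x
    have h2 := pv_drop_head_le a i ha hi (a.getD i2 0) hmem
    rwa [hv] at h2
  omega

theorem pvS_replicate (k : Nat) (v : Int) (b : List Int) :
    pvS (List.replicate k v) b = (k : Int) * (v * (b.count v : Int)) := by
  unfold pvS
  rw [List.map_replicate, List.sum_replicate, nsmul_eq_mul]

theorem pvS_append (a1 a2 b : List Int) : pvS (a1 ++ a2) b = pvS a1 b + pvS a2 b := by
  unfold pvS; rw [List.map_append, List.sum_append]

-- main invariant of the merge loop on sorted lists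
theorem pvMerge_correct (a b : List Int) (i j : Nat) (t : Int)
    (ha : a.Pairwise (· ≤ ·)) (hb : b.Pairwise (· ≤ ·))
    (hi : i ≤ a.length) (hj : j ≤ b.length) :
    pvMergeLoop a b i j t = t + pvS (a.drop i) (b.drop j) := by
  induction i, j, t using pvMergeLoop.induct (a := a) (b := b) with
  | case1 i j t h hlt ih =>
    rw [pvMergeLoop, dif_pos h, if_pos hlt]
    rw [ih h.1 (Nat.le_of_lt h.2)]
    congr 1
    have hcons : a.drop i = a[i] :: a.drop (i + 1) := List.drop_eq_getElem_cons h.1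
    have hcount : (b.drop j).count a[i] = 0 := by
      rw [List.count_eq_zero]
      intro hmem
      have := pv_drop_head_le b j hb h.2 a[i] hmem
      rw [List.getD_eq_getElem a 0 h.1] at hlt
      omega
    rw [hcons]
    unfold pvS
    rw [List.map_cons, List.sum_cons, hcount]
    simp
  | case2 i j t h hlt hgt ih =>
    rw [pvMergeLoop, dif_pos h, if_neg hlt, if_pos hgt]
    rw [ih (Nat.le_of_lt h.1) h.2]
    congr 1
    have hcons : b.drop j = b[j] :: b.drop (j + 1) := List.drop_eq_getElem_cons h.2
    apply pvS_congr_right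
    intro x hx
    rw [hcons, List.count_cons]
    have hxge := pv_drop_head_le a i ha h.1 x hx
    rw [List.getD_eq_getElem b 0 h.2] at hgt
    have hne : ¬ b[j] = x := by omega
    simp [hne]
  | case3 i j t h hlt hgt ih =>
    rw [pvMergeLoop, dif_pos h, if_neg hlt, if_neg hgt]
    have hv : b.getD j 0 = a.getD i 0 := by omega
    set v := a.getD i 0 with hvdef
    set i2 := pvRunEnd a v i with hi2
    set j2 := pvRunEnd b v j with hj2
    have hii2 : i + 1 ≤ i2 := pvRunEnd_succ_le a v i h.1 rfl
    have hjj2 : j + 1 ≤ j2 := pvRunEnd_succ_le b v j h.2 hv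
    have hi2l : i2 ≤ a.length := pvRunEnd_le a v i (Nat.le_of_lt h.1)
    have hj2l : j2 ≤ b.length := pvRunEnd_le b v j (Nat.le_of_lt h.2)
    rw [ih hi2l hj2l]
    have hdropa := pvRunEnd_drop a v i
    have hdropb := pvRunEnd_drop b v j
    rw [← hi2] at hdropa
    rw [← hj2] at hdropb
    -- count of v in drop j b is exactly the run length j2 - j
    have hgta := pv_gt_after_run a v i ha h.1 rfl
    have hgtb := pv_gt_after_run b v j hb h.2 hv
    rw [← hi2] at hgta
    rw [← hj2] at hgtb
    have hcntb : (b.drop j).count v = j2 - j := by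
      rw [hdropb, List.count_append, List.count_replicate]
      have : (b.drop j2).count v = 0 := by
        rw [List.count_eq_zero]
        intro hmem
        exact absurd rfl (ne_of_gt (hgtb v hmem)).symm
      simp [this]
    -- tail of a sees the same counts in drop j b and drop j2 b
    have htail : pvS (a.drop i2) (b.drop j) = pvS (a.drop i2) (b.drop j2) := by
      apply pvS_congr_right
      intro x hx
      rw [hdropb, List.count_append, List.count_replicate]
      have hxv : ¬ v = x := fun hh => absurd hh.symm (ne_of_gt (hgta x hx))
      simp [hxv]
    have hdecomp : pvS (a.drop i) (b.drop j)
        = ((i2 - i : Nat) : Int) * (v * ((j2 - j : Nat) : Int)) + pvS (a.drop i2) (b.drop j2) := by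
      rw [hdropa, pvS_append, pvS_replicate, htail, hcntb]
    rw [hdecomp]
    have hc1 : ((i2 - i : Nat) : Int) = (i2 : Int) - (i : Int) := by omega
    have hc2 : ((j2 - j : Nat) : Int) = (j2 : Int) - (j : Int) := by omega
    rw [hc1, hc2]; ring
  | case4 i j t h =>
    rw [pvMergeLoop, dif_neg h]
    rcases Nat.lt_or_ge i a.length with hlt | hge
    · have hjge : b.length ≤ j := by
        rcases Nat.lt_or_ge j b.length with hj' | hj'
        · exact absurd ⟨hlt, hj'⟩ h
        · exact hj'
      have : b.drop j = [] := List.drop_eq_nil_of_le hjge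
      rw [this, pvS_nil_right]; ring
    · have : a.drop i = [] := List.drop_eq_nil_of_le hge
      rw [this]; unfold pvS; simp

-- pvS is invariant under permuting either argument
theorem pvS_perm (l1 l2 a b : List Int) (h1 : a.Perm l1) (h2 : b.Perm l2) :
    pvS a b = pvS l1 l2 := by
  unfold pvS
  rw [List.map_congr_left (fun x _ => by rw [h2.count_eq])]
  exact (h1.map _).sum_eq

-- A's guarded increment step is extensionally the plain 'insert x (getD x 0 + 1)' counter step.
theorem pv_step_eq :
    (fun (d : PySem.Dict Int Int) (x : Int) =>
        if (d.get? x).getD 0 ≠ 0 then d.insert x ((d.get? x).getD 0 + 1) else d.insert x 1)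
      = (fun (d : PySem.Dict Int Int) (x : Int) => d.insert x (d.getD x 0 + 1)) := by
  funext d x
  by_cases h : (d.get? x).getD 0 = 0 <;>
    simp [h, PySem.Dict.getD_eq_get?_getD]

theorem pv_sum_loop (d : PySem.Dict Int Int) (l2 : List Int)
    (hd : ∀ x, d.getD x 0 = (l2.count x : Int)) (l1 : List Int) (init : Int) :
    l1.foldl (fun results x => results + x * d.getD x 0) init
      = init + pvS l1 l2 := by
  induction l1 generalizing init with
  | nil => simp [pvS]
  | cons x l ih =>
    simp only [List.foldl_cons]
    rw [ih, hd x]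
    simp [pvS, List.map_cons, List.sum_cons]
    ring

-- ===== VERDICT (by name: the statement is the Claim_ definition above) =====
theorem get_similarities_between_lists_py_spec : Claim_equal_get_similarities_between_lists_py := by
  intro l1 l2 _
  unfold Spec_get_similarities_between_lists_py
  unfold get_similarities_between_lists_py get_similarities_between_lists_py_alt
  rw [pv_step_eq]
  rw [pv_sum_loop _ l2 (fun x => by
    rw [PySem.Dict.getD_foldl_insert_add_one]
    simp)]
  rw [pvMerge_correct _ _ 0 0 0
    (PySem.List.sorted_pairwise l1 (fun x => x))
    (PySem.List.sorted_pairwise l2 (fun x => x))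
    (Nat.zero_le _) (Nat.zero_le _)]
  simp only [List.drop_zero, zero_add]
  exact (pvS_perm l1 l2 _ _ (PySem.List.sorted_perm l1 _ _) (PySem.List.sorted_perm l2 _ _)).symm
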